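-- pv_equiv track=rewrite | github.com/alimobrem/pulse-agent | sre_agent/layout_engine.py | _pack_details
-- ===== SOURCE A (Python) =====
-- _DETAIL_PAIRS: dict[str, set[str]] = {
--     "log_viewer": {"key_value", "yaml_viewer"},
--     "key_value": {"relationship_tree", "log_viewer"},
--     "yaml_viewer": {"log_viewer"},
--     "relationship_tree": {"key_value"},
-- }
--
-- def _pack_details(
--     items: list[tuple[int, str, int, int]],
--     positions: dict[int, dict],
--     start_y: int,
-- ) -> int:
--     """Pack detail components, pairing complementary kinds side-by-side."""
--     y = start_y
--
--     if len(items) == 1: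
--         orig_idx, _kind, _w, h = items[0]
--         positions[orig_idx] = {"x": 0, "y": y, "w": 4, "h": h}
--         return y + h
--
--     used: set[int] = set()
--
--     for i, (orig_idx, kind, _w, h) in enumerate(items):
--         if i in used:
--             continue
--
--         # Try to find a compatible partner
--         partner = None
--         compatible = _DETAIL_PAIRS.get(kind, set())
--         for j, (_orig_j, kind_j, _w_j, _h_j) in enumerate(items):
--             if j in used or j == i:
--                 continue
--             if kind_j in compatible:
--                 partner = j
--                 break
--
--         if partner is not None:
--             used.add(i)
--             used.add(partner)
--             orig_j, _kind_j, _w_j, h_j = items[partner]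
--             row_h = max(h, h_j)
--             positions[orig_idx] = {"x": 0, "y": y, "w": 2, "h": row_h}
--             positions[orig_j] = {"x": 2, "y": y, "w": 2, "h": row_h}
--             y += row_h
--         else:
--             used.add(i)
--             positions[orig_idx] = {"x": 0, "y": y, "w": 4, "h": h}
--             y += h
--
--     return y
-- ===== SOURCE B (Python) =====
-- # B: consumes a shrinking work list, pairing the head with the first compatible
-- # element of the tail; no index/used-set bookkeeping. Same positions mutations as A.
--
-- _COMPAT = {
--     "log_viewer": ("key_value", "yaml_viewer"),
--     "key_value": ("relationship_tree", "log_viewer"),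
--     "yaml_viewer": ("log_viewer",),
--     "relationship_tree": ("key_value",),
-- }
--
--
-- def _pack_details(items, positions, start_y):
--     y = start_y
--     rest = list(items)
--     while rest:
--         orig_idx, kind, _w, h = rest[0]
--         tail = rest[1:]
--         comp = _COMPAT.get(kind, ())
--         t = next((k for k, it in enumerate(tail) if it[1] in comp), None)
--         if t is None:
--             positions[orig_idx] = {"x": 0, "y": y, "w": 4, "h": h}
--             y += h
--             rest = tail
--         else:
--             orig_j, _kj, _wj, h_j = tail[t]
--             row_h = max(h, h_j)
--             positions[orig_idx] = {"x": 0, "y": y, "w": 2, "h": row_h}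
--             positions[orig_j] = {"x": 2, "y": y, "w": 2, "h": row_h}
--             y += row_h
--             rest = tail[:t] + tail[t + 1:]
--     return y
-- ===== Notes on version B (the rewrite author's own statement) =====
-- stated objective: simpler
-- what changed: B replaces A's enumerate/used-index-set bookkeeping (inner scan over the whole list skipping used indices) by a shrinking work list: pair the head with the first compatible element of the tail and drop both; no index set, no skip logic, no special case for a single item.
import Mathlib
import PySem

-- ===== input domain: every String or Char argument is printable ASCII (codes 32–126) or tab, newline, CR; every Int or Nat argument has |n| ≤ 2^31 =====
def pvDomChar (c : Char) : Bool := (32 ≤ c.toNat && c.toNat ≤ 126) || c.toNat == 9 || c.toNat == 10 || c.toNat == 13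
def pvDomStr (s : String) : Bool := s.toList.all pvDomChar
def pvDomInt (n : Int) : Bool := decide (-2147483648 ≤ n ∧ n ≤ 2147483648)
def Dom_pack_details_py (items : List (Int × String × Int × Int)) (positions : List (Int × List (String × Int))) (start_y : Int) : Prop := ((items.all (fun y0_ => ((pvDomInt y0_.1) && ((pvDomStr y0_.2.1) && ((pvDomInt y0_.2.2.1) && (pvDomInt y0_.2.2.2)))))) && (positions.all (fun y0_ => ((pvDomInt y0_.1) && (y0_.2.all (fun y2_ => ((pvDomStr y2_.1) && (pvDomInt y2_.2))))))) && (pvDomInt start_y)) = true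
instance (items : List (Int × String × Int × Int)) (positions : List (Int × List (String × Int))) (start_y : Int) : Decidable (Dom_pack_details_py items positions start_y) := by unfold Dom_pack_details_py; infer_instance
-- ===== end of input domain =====

-- B repacks the work as a shrinking list (pair the head with the first compatible tail
-- element) instead of A's index/used-set bookkeeping; objective: simpler.  Both Pythons
-- also mutate `positions` identically in place; the equivalence proved here is about the
-- RETURN value only (the `positions` argument never influences it).

-- ===== PORT A =====
-- _DETAIL_PAIRS.get(kind, set()): only membership is taken, so the set is a list here.
def detailPairs (kind : String) : List String :=
  if kind = "log_viewer" then ["key_value", "yaml_viewer"]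
  else if kind = "key_value" then ["relationship_tree", "log_viewer"]
  else if kind = "yaml_viewer" then ["log_viewer"]
  else if kind = "relationship_tree" then ["key_value"]
  else []

-- body of `for i, (orig_idx, kind, _w, h) in enumerate(items)` (state = (used, y));
-- the inner `for j ... break` is the first hit of its condition, i.e. find?.
def packStep (items : List (Int × String × Int × Int)) (st : PySem.Set Int × Int)
    (p : Int × Int × String × Int × Int) : PySem.Set Int × Int :=
  let used := st.1
  let y := st.2
  let i := p.1
  let kind := p.2.2.1
  let h := p.2.2.2.2
  if PySem.Set.contains used i then st
  else
    let compatible := detailPairs kind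
    let partner := ((PySem.List.enumerate items 0).find? (fun q =>
        !(PySem.Set.contains used q.1) && !(q.1 == i) && compatible.contains q.2.2.1)).map (·.1)
    match partner with
    | some j =>
        let itj := (PySem.List.pyGet? items j).getD (0, "", 0, 0)
        let row_h := max h itj.2.2.2
        (PySem.Set.add (PySem.Set.add used i) j, y + row_h)
    | none => (PySem.Set.add used i, y + h)

def pack_details_py (items : List (Int × String × Int × Int)) (positions : List (Int × List (String × Int))) (start_y : Int) : Int :=
  if items.length = 1 then
    start_y + (items.headD (0, "", 0, 0)).2.2.2
  else
    ((PySem.List.enumerate items 0).foldl (packStep items) (PySem.Set.empty, start_y)).2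

-- ===== PORT B =====
def compatB (kind : String) : List String :=
  if kind = "log_viewer" then ["key_value", "yaml_viewer"]
  else if kind = "key_value" then ["relationship_tree", "log_viewer"]
  else if kind = "yaml_viewer" then ["log_viewer"]
  else if kind = "relationship_tree" then ["key_value"]
  else []

-- Source B's while-loop over the shrinking `rest`; the slices tail[:t] / tail[t+1:] have
-- nonnegative in-range bounds, so they are exactly take t / drop (t+1).
def packRows : List (Int × String × Int × Int) → Int → Int
  | [], y => y
  | (_, kind, _, h) :: tail, y =>
    match tail.findIdx? (fun it => (compatB kind).contains it.2.1) with
    | none => packRows tail (y + h)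
    | some t =>
        let h_j := (tail.getD t (0, "", 0, 0)).2.2.2
        packRows (tail.take t ++ tail.drop (t + 1)) (y + max h h_j)
termination_by rest => rest.length
decreasing_by
  all_goals simp
  all_goals omega

def pack_details_py_alt (items : List (Int × String × Int × Int)) (positions : List (Int × List (String × Int))) (start_y : Int) : Int :=
  packRows items start_y

-- ===== PRECONDITION & SPEC =====
def Spec_pack_details_py (items : List (Int × String × Int × Int)) (positions : List (Int × List (String × Int))) (start_y : Int) (out : Int) : Prop := out = pack_details_py_alt items positions start_y
instance (items : List (Int × String × Int × Int)) (positions : List (Int × List (String × Int))) (start_y : Int) (out : Int) : Decidable (Spec_pack_details_py items positions start_y out) := by unfold Spec_pack_details_py; infer_instance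

-- ===== CLAIM (what is proved, stated in full; the proofs are below) =====
def Claim_equal_pack_details_py : Prop := ∀ (items : List (Int × String × Int × Int)) (positions : List (Int × List (String × Int))) (start_y : Int), Dom_pack_details_py items positions start_y → Spec_pack_details_py items positions start_y (pack_details_py items positions start_y)

-- ===== LEMMAS AND PROOFS =====

-- the availability filter only depends on membership of the indices in `used`
theorem filter_contains_congr (s t : List Int) (l : List (Int × Int × String × Int × Int))
    (h : ∀ q ∈ l, (q.1 ∈ s ↔ q.1 ∈ t)) :
    l.filter (fun q => !(PySem.Set.contains s q.1)) = l.filter (fun q => !(PySem.Set.contains t q.1)) := by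
  apply List.filter_congr
  intro q hq
  simp [h q hq]

theorem compatB_eq_detailPairs (k : String) : compatB k = detailPairs k := rfl

theorem find?_congr_mem {α : Type} (l : List α) (p q : α → Bool) (h : ∀ a ∈ l, p a = q a) :
    l.find? p = l.find? q := by
  induction l with
  | nil => rfl
  | cons a l ih =>
    have ha := h a (by simp)
    simp only [List.find?_cons, ha]
    cases hq : q a
    · exact ih fun b hb => h b (by simp [hb])
    · rfl

-- core correspondence: A's partner search over the (index, item) list with a `used` set
-- matches B's findIdx?/erase step on the filtered item list.
theorem find_matches (comp : List String) (d : Int × String × Int × Int) :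
    ∀ (l : List (Int × Int × String × Int × Int)) (used : List Int),
    (l.map (·.1)).Nodup →
    (l.find? (fun q => !(PySem.Set.contains used q.1) && comp.contains q.2.2.1) = none
       ∧ ((l.filter (fun q => !(PySem.Set.contains used q.1))).map (·.2)).findIdx?
            (fun it => comp.contains it.2.1) = none)
    ∨ (∃ j itj t,
        l.find? (fun q => !(PySem.Set.contains used q.1) && comp.contains q.2.2.1) = some (j, itj)
        ∧ ((l.filter (fun q => !(PySem.Set.contains used q.1))).map (·.2)).findIdx?
            (fun it => comp.contains it.2.1) = some t
        ∧ ((l.filter (fun q => !(PySem.Set.contains used q.1))).map (·.2)).getD t d = itj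
        ∧ (l.filter (fun q => !(PySem.Set.contains (PySem.Set.add used j) q.1))).map (·.2)
            = (((l.filter (fun q => !(PySem.Set.contains used q.1))).map (·.2)).take t)
              ++ (((l.filter (fun q => !(PySem.Set.contains used q.1))).map (·.2)).drop (t+1))) := by
  intro l
  induction l with
  | nil => intro used _; left; simp
  | cons q l ih =>
    intro used hnd
    rw [List.map_cons, List.nodup_cons] at hnd
    have hqnotin : q.1 ∉ l.map (·.1) := hnd.1
    have hnd' : (l.map (·.1)).Nodup := hnd.2
    by_cases hmem : q.1 ∈ used
    · rcases ih used hnd' with ⟨h1, h2⟩ | ⟨j, itj, t, h1, h2, h3, h4⟩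
      · left
        refine ⟨?_, ?_⟩
        · rw [List.find?_cons_of_neg (by simp [hmem]), h1]
        · rw [List.filter_cons_of_neg (by simp [hmem])]; exact h2
      · right
        refine ⟨j, itj, t, ?_, ?_, ?_, ?_⟩
        · rw [List.find?_cons_of_neg (by simp [hmem]), h1]
        · rw [List.filter_cons_of_neg (by simp [hmem])]; exact h2
        · rw [List.filter_cons_of_neg (by simp [hmem])]; exact h3
        · rw [List.filter_cons_of_neg (pa := by simp [PySem.Set.mem_add, hmem]),
             List.filter_cons_of_neg (by simp [hmem])]
          exact h4
    · by_cases hk : q.2.2.1 ∈ comp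
      · right
        refine ⟨q.1, q.2, 0, ?_, ?_, ?_, ?_⟩
        · rw [List.find?_cons_of_pos (by simp [hmem, hk])]
        · rw [List.filter_cons_of_pos (by simp [hmem]), List.map_cons, List.findIdx?_cons,
            if_pos (by simp [hk])]
        · rw [List.filter_cons_of_pos (by simp [hmem])]; simp
        · have hrest : l.filter (fun r => !(PySem.Set.contains (PySem.Set.add used q.1) r.1))
              = l.filter (fun r => !(PySem.Set.contains used r.1)) := by
            apply filter_contains_congr
            intro r hr
            have hne : r.1 ≠ q.1 := by
              intro he; exact hqnotin (he ▸ List.mem_map_of_mem hr)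
            simp [PySem.Set.mem_add, hne]
          rw [List.filter_cons_of_neg (by simp [PySem.Set.mem_add]), hrest,
            List.filter_cons_of_pos (by simp [hmem])]
          simp
      · rcases ih used hnd' with ⟨h1, h2⟩ | ⟨j, itj, t, h1, h2, h3, h4⟩
        · left
          refine ⟨?_, ?_⟩
          · rw [List.find?_cons_of_neg (by simp [hk]), h1]
          · rw [List.filter_cons_of_pos (by simp [hmem]), List.map_cons, List.findIdx?_cons,
              if_neg (by simp [hk]), h2]
            rfl
        · right
          have hjmem : j ∈ l.map (·.1) := by
            have hm := List.mem_of_find?_eq_some h1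
            exact List.mem_map_of_mem (f := (·.1)) hm
          have hneq : q.1 ≠ j := by
            intro he; exact hqnotin (he ▸ hjmem)
          refine ⟨j, itj, t + 1, ?_, ?_, ?_, ?_⟩
          · rw [List.find?_cons_of_neg (by simp [hk]), h1]
          · rw [List.filter_cons_of_pos (by simp [hmem]), List.map_cons, List.findIdx?_cons,
              if_neg (by simp [hk]), h2]
            rfl
          · rw [List.filter_cons_of_pos (by simp [hmem]), List.map_cons, List.getD_cons_succ]
            exact h3
          · rw [List.filter_cons_of_pos (by simp [PySem.Set.mem_add, hmem, hneq]),
              List.filter_cons_of_pos (by simp [hmem]), List.map_cons, List.map_cons,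
              List.take_succ_cons, List.drop_succ_cons, List.cons_append, h4]

theorem main_loop_eq (items : List (Int × String × Int × Int)) :
    ∀ (rest pre : List (Int × Int × String × Int × Int)) (used : List Int) (y : Int),
      PySem.List.enumerate items 0 = pre ++ rest →
      (∀ q ∈ pre, q.1 ∈ used) →
      (rest.foldl (packStep items) (used, y)).2
        = packRows ((rest.filter (fun q => !(PySem.Set.contains used q.1))).map (·.2)) y := by
  intro rest
  induction rest with
  | nil => intro pre used y _ _; simp [packRows]
  | cons p rest ih =>
    intro pre used y hE hpre
    obtain ⟨i, oi, kind, w, h⟩ := p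
    have hpair : (pre ++ (i, oi, kind, w, h) :: rest).Pairwise (fun p q => p.1 < q.1) := by
      rw [← hE]; exact PySem.List.pairwise_lt_enumerate items 0
    have hcons := (List.pairwise_append.mp hpair).2.1
    have hlt : ∀ q ∈ rest, i < q.1 := fun q hq => (List.pairwise_cons.mp hcons).1 q hq
    have hpw : rest.Pairwise (fun a b => a.1 < b.1) := (List.pairwise_cons.mp hcons).2
    have hnd : (rest.map (·.1)).Nodup := List.pairwise_map.mpr (hpw.imp fun hab => ne_of_lt hab)
    have hinotin : ∀ q ∈ rest, q.1 ≠ i := fun q hq => (hlt q hq).ne'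
    rw [List.foldl_cons]
    by_cases hcm : i ∈ used
    · have hstep : packStep items (used, y) (i, oi, kind, w, h) = (used, y) := by
        simp [packStep, hcm]
      rw [hstep, List.filter_cons_of_neg (by simp [hcm])]
      refine ih (pre ++ [(i, oi, kind, w, h)]) used y (by rw [hE, List.append_assoc]; rfl) ?_
      intro q hq
      rcases List.mem_append.mp hq with hx | hx
      · exact hpre q hx
      · rw [List.mem_singleton.mp hx]; exact hcm
    · have hfind : (PySem.List.enumerate items 0).find?
            (fun q => !(PySem.Set.contains used q.1) && !(q.1 == i)
              && (detailPairs kind).contains q.2.2.1)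
          = rest.find? (fun q => !(PySem.Set.contains used q.1)
              && (detailPairs kind).contains q.2.2.1) := by
        rw [hE, List.find?_append, List.find?_eq_none.mpr (fun q hq => by simp [hpre q hq]),
          Option.none_or, List.find?_cons_of_neg (by simp)]
        refine find?_congr_mem _ _ _ (fun q hq => ?_)
        have hbe : (q.1 == i) = false := beq_eq_false_iff_ne.mpr (hinotin q hq)
        simp [hbe]
      rw [List.filter_cons_of_pos (by simp [hcm]), List.map_cons]
      rcases find_matches (detailPairs kind) (0, "", 0, 0) rest used hnd with
        ⟨h1, h2⟩ | ⟨j, itj, t, h1, h2, h3, h4⟩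
      · have hstep : packStep items (used, y) (i, oi, kind, w, h)
            = (PySem.Set.add used i, y + h) := by
          simp only [packStep]
          rw [if_neg (by simp [hcm]), hfind, h1]
          rfl
        rw [hstep]
        have hB : packRows ((oi, kind, w, h) ::
              (rest.filter (fun q => !(PySem.Set.contains used q.1))).map (·.2)) y
            = packRows ((rest.filter (fun q => !(PySem.Set.contains used q.1))).map (·.2))
                (y + h) := by
          simp only [packRows, compatB_eq_detailPairs, h2]
        rw [hB]
        have hfilt : rest.filter (fun q => !(PySem.Set.contains (PySem.Set.add used i) q.1))
            = rest.filter (fun q => !(PySem.Set.contains used q.1)) := by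
          apply filter_contains_congr
          intro q hq
          simp [PySem.Set.mem_add, hinotin q hq]
        rw [← hfilt]
        refine ih (pre ++ [(i, oi, kind, w, h)]) (PySem.Set.add used i) (y + h)
          (by rw [hE, List.append_assoc]; rfl) ?_
        intro q hq
        rcases List.mem_append.mp hq with hx | hx
        · have := hpre q hx
          simp [PySem.Set.mem_add, this]
        · rw [List.mem_singleton.mp hx]
          simp [PySem.Set.mem_add]
      · have hjget : (PySem.List.pyGet? items j).getD (0, "", 0, 0) = itj := by
          have hmemE : (j, itj) ∈ PySem.List.enumerate items 0 := by
            rw [hE]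
            exact List.mem_append_right _
              (List.mem_cons_of_mem _ (List.mem_of_find?_eq_some h1))
          obtain ⟨k, hk, hkeq⟩ := (PySem.List.mem_enumerate_iff items 0 (j, itj)).mp hmemE
          have hj : j = (k : Int) := by
            have := congrArg Prod.fst hkeq; simpa using this
          have hit : itj = items[k] := by
            have := congrArg Prod.snd hkeq; simpa using this
          rw [hj, PySem.List.pyGet?_natCast, List.getElem?_eq_getElem hk, hit]
          rfl
        have hstep : packStep items (used, y) (i, oi, kind, w, h)
            = (PySem.Set.add (PySem.Set.add used i) j, y + max h itj.2.2.2) := by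
          simp only [packStep]
          rw [if_neg (by simp [hcm]), hfind, h1]
          simp [hjget]
        rw [hstep]
        have hB : packRows ((oi, kind, w, h) ::
              (rest.filter (fun q => !(PySem.Set.contains used q.1))).map (·.2)) y
            = packRows
                ((((rest.filter (fun q => !(PySem.Set.contains used q.1))).map (·.2)).take t)
                  ++ (((rest.filter (fun q => !(PySem.Set.contains used q.1))).map (·.2)).drop (t+1)))
                (y + max h itj.2.2.2) := by
          simp only [packRows, compatB_eq_detailPairs, h2, h3]
        rw [hB, ← h4]
        have hfilt : rest.filter
              (fun q => !(PySem.Set.contains (PySem.Set.add (PySem.Set.add used i) j) q.1))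
            = rest.filter (fun q => !(PySem.Set.contains (PySem.Set.add used j) q.1)) := by
          apply filter_contains_congr
          intro q hq
          simp [PySem.Set.mem_add, hinotin q hq]
        rw [← hfilt]
        refine ih (pre ++ [(i, oi, kind, w, h)])
          (PySem.Set.add (PySem.Set.add used i) j) (y + max h itj.2.2.2)
          (by rw [hE, List.append_assoc]; rfl) ?_
        intro q hq
        rcases List.mem_append.mp hq with hx | hx
        · have := hpre q hx
          simp [PySem.Set.mem_add, this]
        · rw [List.mem_singleton.mp hx]
          simp [PySem.Set.mem_add]

-- ===== VERDICT (by name: the statement is the Claim_ definition above) =====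
theorem pack_details_py_spec : Claim_equal_pack_details_py := by
  intro items positions start_y _hdom
  show pack_details_py items positions start_y = pack_details_py_alt items positions start_y
  unfold pack_details_py pack_details_py_alt
  by_cases hlen : items.length = 1
  · obtain ⟨a, ha⟩ := List.length_eq_one_iff.mp hlen
    obtain ⟨oi, kind, w, h⟩ := a
    subst ha
    simp [packRows]
  · rw [if_neg hlen]
    have hmain := main_loop_eq items (PySem.List.enumerate items 0) [] [] start_y
      (by simp) (by simp)
    have hfilt : (PySem.List.enumerate items 0).filter
          (fun q => !(PySem.Set.contains ([] : List Int) q.1))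
        = PySem.List.enumerate items 0 :=
      List.filter_eq_self.mpr (fun q _ => by simp)
    rw [hfilt, PySem.List.map_snd_enumerate] at hmain
    exact hmain
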